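-- pv_equiv track=rewrite | github.com/bnbbbb/Algotithm | 프로그래머스/unrated/181904. 세로 읽기/세로 읽기.py | solution
-- ===== SOURCE A (Python) =====
-- def solution(my_string, m, c):
--     answer = []
--     result = ""
--     for i in range(len(my_string) // m):
--         answer.append(my_string[i * m : m * (i + 1)])
--     for i in answer:
--         result += i[c - 1]
--     return result
-- ===== SOURCE B (Python) =====
-- def solution(my_string, m, c):
--     # Read column c directly: normalize the column index the way Python row
--     # indexing does, then walk the characters at that offset in each full row.
--     rows = len(my_string) // m
--     if rows <= 0:
--         return ""
--     start = (c - 1) % m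
--     return "".join(my_string[start + i * m] for i in range(rows))
-- ===== Notes on version B (the rewrite author's own statement) =====
-- stated objective: alternative
-- what changed: B reads the column in one strided walk over character positions start, start+m, ... (start = (c-1) % m, the normalized column offset) of the full rows, instead of A's two passes that first build the list of all row chunks and then index each chunk.
import Mathlib
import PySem

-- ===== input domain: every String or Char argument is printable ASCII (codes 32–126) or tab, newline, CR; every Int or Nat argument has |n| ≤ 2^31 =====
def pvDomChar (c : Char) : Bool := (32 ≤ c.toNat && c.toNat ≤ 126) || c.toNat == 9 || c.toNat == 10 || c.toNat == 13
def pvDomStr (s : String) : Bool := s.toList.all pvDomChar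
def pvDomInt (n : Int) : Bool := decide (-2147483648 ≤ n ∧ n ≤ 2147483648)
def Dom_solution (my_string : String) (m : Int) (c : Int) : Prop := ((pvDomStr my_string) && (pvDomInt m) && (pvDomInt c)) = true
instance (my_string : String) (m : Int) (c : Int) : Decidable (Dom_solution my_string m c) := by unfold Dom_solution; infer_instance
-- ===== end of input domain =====

-- B reads the column in one strided walk from the normalized offset (c-1) % m,
-- instead of A's two passes that first build the list of all row chunks.

-- ===== PORT A =====
def solution (my_string : String) (m : Int) (c : Int) : String :=
  -- answer = []; for i in range(len(my_string) // m): answer.append(my_string[i*m : m*(i+1)])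
  let answer : List (List Char) :=
    (PySem.List.pyRange 0 (PySem.Int.floordiv (PySem.Str.len my_string) m) 1).foldl
      (fun acc i => acc ++ [PySem.List.slice my_string.toList (some (i * m)) (some (m * (i + 1)))]) []
  -- result = ""; for i in answer: result += i[c-1]   (none = IndexError, excluded by Pre_)
  let result : Option (List Char) :=
    answer.foldl (fun acc chunk =>
      match acc, PySem.List.pyGet? chunk (c - 1) with
      | some r, some ch => some (r ++ [ch])
      | _, _ => none) (some [])
  match result with
  | some r => String.ofList r
  | none => ""  -- unreachable under Pre_solution: Python raises IndexError here

-- ===== PORT B =====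
def solution_alt (my_string : String) (m : Int) (c : Int) : String :=
  let rows := PySem.Int.floordiv (PySem.Str.len my_string) m
  if rows ≤ 0 then ""
  else
    let start := PySem.Int.mod (c - 1) m
    -- "".join(my_string[start + i * m] for i in range(rows))
    match (PySem.List.pyRange 0 rows 1).mapM
        (fun i => PySem.Str.pyGet? my_string (start + i * m)) with
    | some chars => String.ofList chars
    | none => ""  -- unreachable under Pre_solution: Python raises IndexError here

-- ===== PRECONDITION & SPEC =====
-- Pre_ excludes exactly the inputs where A raises: m = 0 (ZeroDivisionError) and,
-- when at least one full row exists, a column index c-1 outside [-m, m) (IndexError).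
def Pre_solution (my_string : String) (m : Int) (c : Int) : Prop :=
  m ≠ 0 ∧ (1 ≤ PySem.Int.floordiv (PySem.Str.len my_string) m → (-m ≤ c - 1 ∧ c - 1 < m))
instance (my_string : String) (m : Int) (c : Int) : Decidable (Pre_solution my_string m c) := by
  unfold Pre_solution; infer_instance
def pvWitness_solution : String × Int × Int := ("abcdef", 2, 2)

def Spec_solution (my_string : String) (m : Int) (c : Int) (out : String) : Prop :=
  out = solution_alt my_string m c
instance (my_string : String) (m : Int) (c : Int) (out : String) : Decidable (Spec_solution my_string m c out) := by
  unfold Spec_solution; infer_instance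

-- ===== CLAIM (what is proved, stated in full; the proofs are below) =====
def Claim_equal_solution : Prop := ∀ (my_string : String) (m : Int) (c : Int), Dom_solution my_string m c → Pre_solution my_string m c → Spec_solution my_string m c (solution my_string m c)

-- ===== LEMMAS AND PROOFS =====

-- Python floor division of a nonnegative number by a negative one is ≤ 0.
lemma pv_fdiv_nonpos (a b : Int) (ha : 0 ≤ a) (hb : b < 0) : PySem.Int.floordiv a b ≤ 0 := by
  show a.fdiv b ≤ 0
  rw [Int.fdiv_eq_ediv]
  have h1 : a / b ≤ 0 := by
    rw [show b = -(-b) by ring, Int.ediv_neg]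
    have := Int.ediv_nonneg ha (by omega : (0:Int) ≤ -b)
    omega
  split <;> omega

lemma pv_pyGet?_isSome {α : Type} (l : List α) (i : Int)
    (h1 : -(l.length : Int) ≤ i) (h2 : i < l.length) : (PySem.List.pyGet? l i).isSome := by
  rw [Option.isSome_iff_ne_none]; intro h
  rw [PySem.List.pyGet?_eq_none_iff] at h
  exact h (by simp [PySem.Raise.InRange]; omega)

-- the `+=` Option fold of port A over a list of all-valid lookups
lemma pv_optfold {α : Type} (g : α → Option Char) (xs : List α) (d : Char)
    (h : ∀ x ∈ xs, (g x).isSome) (acc : List Char) :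
    xs.foldl (fun a x =>
      match a, g x with
      | some r, some ch => some (r ++ [ch])
      | _, _ => none) (some acc)
      = some (acc ++ xs.map (fun x => (g x).getD d)) := by
  induction xs generalizing acc with
  | nil => simp
  | cons y ys ih =>
    have hy := h y (by simp)
    rcases Option.isSome_iff_exists.mp hy with ⟨v, hv⟩
    have := ih (fun x hx => h x (by simp [hx]))
    simp [hv, this ((acc ++ [v]))]

-- the generator join of port B over all-valid lookups
lemma pv_mapM_some {α : Type} (g : α → Option Char) (xs : List α) (d : Char)
    (h : ∀ x ∈ xs, (g x).isSome) :
    xs.mapM g = some (xs.map (fun x => (g x).getD d)) := by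
  induction xs with
  | nil => simp
  | cons y ys ih =>
    have hy := h y (by simp)
    rcases Option.isSome_iff_exists.mp hy with ⟨v, hv⟩
    have := ih (fun x hx => h x (by simp [hx]))
    simp [List.mapM_cons, hv, this]

-- A's slice my_string[i*m : m*(i+1)] is a drop/take chunk
lemma pv_chunk (l : List Char) (m : Int) (hm : 0 < m) (k : Nat) :
    PySem.List.slice l (some ((k:Int) * m)) (some (m * ((k:Int) + 1)))
      = (l.drop (k * m.toNat)).take m.toNat := by
  rw [show ((k:Int) * m) = ((k * m.toNat : Nat) : Int) by push_cast; rw [Int.toNat_of_nonneg (by omega)],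
      show (m * ((k:Int) + 1)) = ((m.toNat * (k+1) : Nat) : Int) by push_cast [Int.toNat_of_nonneg (le_of_lt hm)]; ring,
      PySem.List.slice_natCast]
  congr 1
  have h : m.toNat * (k+1) = k * m.toNat + m.toNat := by ring
  omega

-- every full chunk has exactly m characters
lemma pv_chunklen (l : List Char) (mn k r : Nat) (hmn : 0 < mn) (hk : k < r) (hr : r = l.length / mn) :
    ((l.drop (k * mn)).take mn).length = mn := by
  simp
  have : (k+1) * mn ≤ l.length := by
    rw [hr] at hk
    calc (k+1) * mn ≤ (l.length / mn) * mn := Nat.mul_le_mul_right _ hk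
    _ ≤ l.length := Nat.div_mul_le_self _ _
  have : (k+1)*mn = k*mn + mn := by ring
  omega

-- normal form of port A for m > 0 and a column index Python accepts
lemma pv_A_norm (s : String) (m c : Int) (hm : 0 < m)
    (h0 : -m ≤ c - 1) (h1 : c - 1 < m) :
    solution s m c = String.ofList
      ((List.range (s.toList.length / m.toNat)).map
        (fun k => (PySem.List.pyGet?
            ((s.toList.drop (k * m.toNat)).take m.toNat) (c - 1)).getD 'A')) := by
  have hmn : ((m.toNat : Nat) : Int) = m := Int.toNat_of_nonneg (le_of_lt hm)
  have hflo : PySem.Int.floordiv (PySem.Str.len s) m = ((s.toList.length / m.toNat : Nat) : Int) := by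
    rw [PySem.Str.len_eq, ← hmn, PySem.Int.floordiv_natCast]; simp
  unfold solution
  rw [hflo, PySem.List.pyRange_one]
  simp only [sub_zero, Int.toNat_natCast, zero_add, List.map_map,
      PySem.List.foldl_append_singleton_eq_map, List.nil_append]
  have hchunks : List.map ((fun i => PySem.List.slice s.toList (some (i * m)) (some (m * (i + 1)))) ∘ (fun k : Nat => (k:Int)))
        (List.range (s.toList.length / m.toNat))
      = List.map (fun k => (s.toList.drop (k * m.toNat)).take m.toNat)
        (List.range (s.toList.length / m.toNat)) := by
    apply List.map_congr_left
    intro k hk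
    exact pv_chunk s.toList m hm k
  rw [hchunks]
  have hsome : ∀ chunk ∈ List.map (fun k => (s.toList.drop (k * m.toNat)).take m.toNat)
        (List.range (s.toList.length / m.toNat)),
      (PySem.List.pyGet? chunk (c - 1)).isSome := by
    intro chunk hc
    rcases List.mem_map.mp hc with ⟨k, hk, rfl⟩
    have hlen := pv_chunklen s.toList m.toNat k _ (by omega) (List.mem_range.mp hk) rfl
    apply pv_pyGet?_isSome
    · rw [hlen]; omega
    · rw [hlen]; omega
  rw [pv_optfold _ _ 'A' hsome]
  simp only [List.map_map]
  rfl

-- normal form of port B for m > 0, at least one full row, and a column index Python accepts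
lemma pv_B_norm (s : String) (m c : Int) (hm : 0 < m)
    (hr : 1 ≤ PySem.Int.floordiv (PySem.Str.len s) m) :
    solution_alt s m c = String.ofList
      ((List.range (s.toList.length / m.toNat)).map
        (fun k : Nat => (PySem.Str.pyGet? s (PySem.Int.mod (c - 1) m + (k:Int) * m)).getD 'A')) := by
  have hmn : ((m.toNat : Nat) : Int) = m := Int.toNat_of_nonneg (le_of_lt hm)
  set L := s.toList.length with hL
  set r := L / m.toNat with hrdef
  have hflo : PySem.Int.floordiv (PySem.Str.len s) m = (r : Int) := by
    rw [PySem.Str.len_eq, ← hmn, PySem.Int.floordiv_natCast]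
  rw [hflo] at hr
  have hr1 : 1 ≤ r := by exact_mod_cast hr
  have hrmL : r * m.toNat ≤ L := Nat.div_mul_le_self L m.toNat
  have hmod : PySem.Int.mod (c - 1) m = (c - 1) % m := PySem.Int.mod_eq_emod_of_pos hm
  have hj0 : 0 ≤ (c - 1) % m := Int.emod_nonneg _ (by omega)
  have hj1 : (c - 1) % m < m := Int.emod_lt_of_pos _ hm
  rw [solution_alt]
  rw [hflo, if_neg (by omega : ¬ (r:Int) ≤ 0), PySem.List.pyRange_one]
  simp only [sub_zero, Int.toNat_natCast, zero_add]
  have hsome : ∀ i ∈ List.map (fun k : Nat => (k:Int))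
        (List.range r),
      (PySem.Str.pyGet? s (PySem.Int.mod (c - 1) m + i * m)).isSome := by
    intro i hi
    rcases List.mem_map.mp hi with ⟨k, hk, rfl⟩
    have hk' : k < r := List.mem_range.mp hk
    show (PySem.List.pyGet? s.toList (PySem.Int.mod (c - 1) m + (k:Int) * m)).isSome
    rw [hmod]
    have hub : ((k:Int) + 1) * m ≤ ((r * m.toNat : Nat) : Int) := by
      push_cast [hmn]
      have : ((k:Int) + 1) ≤ (r:Int) := by exact_mod_cast hk'
      nlinarith
    apply pv_pyGet?_isSome
    · have : (0:Int) ≤ (k:Int) * m := by positivity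
      omega
    · have hLr : ((r * m.toNat : Nat) : Int) ≤ (L:Int) := by exact_mod_cast hrmL
      nlinarith
  rw [List.mapM_map] at *
  have := pv_mapM_some (fun i : Int => PySem.Str.pyGet? s (PySem.Int.mod (c - 1) m + i * m)) ((List.range r).map (fun k : Nat => (k:Int))) 'A' hsome
  rw [List.mapM_map] at this
  rw [this]
  simp only [List.map_map]
  rfl

-- the chunk lookup with Python's (possibly negative) index is the lookup at (c-1) % m
lemma pv_chunkGet (chunk : List Char) (m c : Int) (hm : 0 < m)
    (hlen : chunk.length = m.toNat) (h0 : -m ≤ c - 1) (h1 : c - 1 < m) :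
    PySem.List.pyGet? chunk (c - 1) = chunk[((c - 1) % m).toNat]? := by
  by_cases hc : 0 ≤ c - 1
  · have hj : (c - 1) % m = c - 1 := Int.emod_eq_of_lt hc h1
    rw [hj]
    exact PySem.List.pyGet?_of_nonneg chunk hc
  · push_neg at hc
    set k' := (-(c - 1)).toNat with hk'
    have hck : c - 1 = -(k' : Int) := by omega
    have hk0 : 0 < k' := by omega
    have hkle : k' ≤ chunk.length := by rw [hlen]; omega
    rw [hck, PySem.List.pyGet?_neg_natCast _ _ hk0 hkle]
    congr 1
    have h2 : (c - 1) % m = c - 1 + m := by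
      have h3 := Int.add_mul_emod_self_left (a := c - 1) (b := m) (c := 1)
      rw [mul_one] at h3
      rw [← h3]
      exact Int.emod_eq_of_lt (by omega) (by omega)
    rw [← hck, h2]
    omega

-- with no full row A's first loop runs zero times and it returns ""
lemma pv_A_empty (s : String) (m c : Int)
    (hr : PySem.Int.floordiv (PySem.Str.len s) m ≤ 0) : solution s m c = "" := by
  unfold solution
  rw [PySem.List.pyRange_one_eq_nil hr]
  simp

-- ===== VERDICT (by name: the statement is the Claim_ definition above) =====
theorem solution_spec : Claim_equal_solution := by
  intro s m c _hdom hpre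
  unfold Spec_solution
  obtain ⟨hm0, hpre2⟩ := hpre
  by_cases hrow : 1 ≤ PySem.Int.floordiv (PySem.Str.len s) m
  · -- at least one full row: m > 0 and c-1 a valid Python index into each row
    have hm : 0 < m := by
      by_contra h
      push_neg at h
      have hml : m < 0 := by omega
      have := pv_fdiv_nonpos (PySem.Str.len s) m (by rw [PySem.Str.len_eq]; positivity) hml
      omega
    obtain ⟨hc0, hc1⟩ := hpre2 hrow
    have hmod : PySem.Int.mod (c - 1) m = (c - 1) % m := PySem.Int.mod_eq_emod_of_pos hm
    have hj0 : 0 ≤ (c - 1) % m := Int.emod_nonneg _ (by omega)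
    have hj1 : (c - 1) % m < m := Int.emod_lt_of_pos _ hm
    rw [pv_A_norm s m c hm hc0 hc1, pv_B_norm s m c hm hrow]
    congr 1
    apply List.map_congr_left
    intro k hk
    have hk' := List.mem_range.mp hk
    set jn := ((c - 1) % m).toNat with hjn
    have hjm : jn < m.toNat := by omega
    have hlen := pv_chunklen s.toList m.toNat k _ (by omega) hk' rfl
    rw [pv_chunkGet _ m c hm hlen hc0 hc1]
    rw [List.getElem?_take_of_lt hjm, List.getElem?_drop]
    have hcast : ((jn : Nat) : Int) = (c - 1) % m := Int.toNat_of_nonneg hj0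
    rw [hmod, show (c - 1) % m + (k:Int) * m = ((jn + k * m.toNat : Nat) : Int) by
          rw [Nat.cast_add, Nat.cast_mul, hcast, Int.toNat_of_nonneg hm.le],
        PySem.Str.pyGet?_natCast, Nat.add_comm]
  · -- no full row: both return ""
    push_neg at hrow
    rw [pv_A_empty s m c (by omega), solution_alt]
    simp only [if_pos (by omega : PySem.Int.floordiv (PySem.Str.len s) m ≤ 0)]
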